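-- pv_equiv track=rewrite | github.com/rymaspic/6.034-ArtificialIntelligence | Labs/lab0/lab0.py | compute_string_properties
-- ===== SOURCE A (Python) =====
-- def compute_string_properties(string):
--     """Given a string of lowercase letters, returns a tuple containing the
--     following three elements:
--         0. The length of the string
--         1. A list of all the characters in the string (including duplicates, if
--            any), sorted in REVERSE alphabetical order
--         2. The number of distinct characters in the string (hint: use a set)
--     """
--     str = []
--     t = []
--     for index in string:
--         t.append(index)
--     t = sorted(t, reverse=True)
--     t2 = len(list(set(string)))
--     str.append(len(string))
--     str.append(t)
--     str.append(t2)
--     str = tuple(str)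
--     return str
-- ===== SOURCE B (Python) =====
-- def compute_string_properties(string):
--     counts = {}
--     for ch in string:
--         counts[ch] = counts.get(ch, 0) + 1
--     chars = []
--     for ch in sorted(counts, reverse=True):
--         chars += [ch] * counts[ch]
--     return (len(string), chars, len(counts))
-- ===== Notes on version B (the rewrite author's own statement) =====
-- stated objective: alternative
-- what changed: Replaces copy-then-comparison-sort of all n characters by a one-pass frequency dict; the reverse-sorted list is rebuilt from the distinct keys sorted descending, each repeated count times, and the distinct count is the dict's size.
import Mathlib
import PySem

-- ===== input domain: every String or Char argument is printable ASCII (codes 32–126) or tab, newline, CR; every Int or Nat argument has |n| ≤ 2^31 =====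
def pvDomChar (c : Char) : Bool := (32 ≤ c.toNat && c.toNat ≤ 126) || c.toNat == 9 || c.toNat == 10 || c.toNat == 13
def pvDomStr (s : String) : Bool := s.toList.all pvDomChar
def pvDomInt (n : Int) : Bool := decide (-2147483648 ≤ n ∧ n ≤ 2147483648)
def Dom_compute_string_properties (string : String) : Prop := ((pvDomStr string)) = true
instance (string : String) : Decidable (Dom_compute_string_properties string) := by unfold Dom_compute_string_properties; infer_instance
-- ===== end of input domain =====

-- B replaces the full comparison sort of all characters by a frequency dict whose
-- distinct keys are sorted descending and expanded by their counts (objective: alternative).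

-- ===== PORT A =====
def compute_string_properties (string : String) : Int × List String × Int :=
  -- t = []; for index in string: t.append(index)
  let t : List String := string.toList.foldl (fun acc c => acc ++ [String.ofList [c]]) []
  -- t = sorted(t, reverse=True)
  let t := PySem.List.sorted t (fun x => x) true
  -- t2 = len(list(set(string)))
  let t2 : Int := (PySem.Set.ofList (string.toList.map (fun c => String.ofList [c]))).length
  ((string.toList.length : Int), t, t2)

-- ===== PORT B =====
def compute_string_properties_alt (string : String) : Int × List String × Int :=
  -- counts = {}; for ch in string: counts[ch] = counts.get(ch, 0) + 1
  let counts : PySem.Dict String Int :=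
    (string.toList.map (fun c => String.ofList [c])).foldl
      (fun d x => d.insert x (d.getD x 0 + 1)) PySem.Dict.empty
  -- chars = []; for ch in sorted(counts, reverse=True): chars += [ch] * counts[ch]
  let chars : List String :=
    (PySem.List.sorted counts.keys (fun k => k) true).foldl
      (fun acc k => acc ++ PySem.List.pyRepeat [k] (counts.getD k 0)) []
  ((string.toList.length : Int), chars, (counts.size : Int))

-- ===== PRECONDITION & SPEC =====
def Spec_compute_string_properties (string : String) (out : Int × List String × Int) : Prop := out = compute_string_properties_alt string
instance (string : String) (out : Int × List String × Int) : Decidable (Spec_compute_string_properties string out) := by unfold Spec_compute_string_properties; infer_instance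

-- ===== CLAIM (what is proved, stated in full; the proofs are below) =====
def Claim_equal_compute_string_properties : Prop := ∀ (string : String), Dom_compute_string_properties string → Spec_compute_string_properties string (compute_string_properties string)

-- ===== LEMMAS AND PROOFS =====

-- counting elements of the key-grouped expansion
theorem pv_count_flatMap_replicate (xs ks : List String) (h : ks.Nodup) (a : String) :
    (ks.flatMap (fun k => List.replicate (xs.count k) k)).count a
      = if a ∈ ks then xs.count a else 0 := by
  induction ks with
  | nil => simp
  | cons k ks ih =>
    rcases List.nodup_cons.mp h with ⟨hk, hnd⟩
    simp only [List.flatMap_cons, List.count_append, List.count_replicate, ih hnd,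
      List.mem_cons]
    by_cases hak : a = k
    · subst hak
      simp [hk]
    · simp [hak, Ne.symm hak]

-- the expansion of a strictly decreasing key list is weakly decreasing
theorem pv_pairwise_ge_flatMap (ks : List String) (cnt : String → Nat)
    (h : ks.Pairwise (fun a b => b < a)) :
    (ks.flatMap (fun k => List.replicate (cnt k) k)).Pairwise (fun a b => b ≤ a) := by
  induction ks with
  | nil => simp
  | cons k ks ih =>
    rcases List.pairwise_cons.mp h with ⟨hk, htl⟩
    rw [List.flatMap_cons, List.pairwise_append]
    refine ⟨?_, ih htl, ?_⟩
    · exact List.pairwise_replicate.mpr (Or.inr le_rfl)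
    · intro a ha b hb
      rcases List.mem_flatMap.mp hb with ⟨k2, hk2, hbk2⟩
      have hak := List.eq_of_mem_replicate ha
      have hbk := List.eq_of_mem_replicate hbk2
      subst hak; subst hbk
      exact le_of_lt (hk _ hk2)

-- sorting all of xs in reverse = expanding the reverse-sorted distinct keys by their counts
theorem pv_sorted_rev_eq_grouped (xs : List String) :
    PySem.List.sorted xs (fun x => x) true
      = (PySem.List.sorted (PySem.Set.ofList xs) (fun k => k) true).flatMap
          (fun k => List.replicate (xs.count k) k) := by
  set ks := PySem.List.sorted (PySem.Set.ofList xs) (fun k => k) true with hks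
  set ys := ks.flatMap (fun k => List.replicate (xs.count k) k) with hys
  have hperm_ks : ks.Perm (PySem.Set.ofList xs) := PySem.List.sorted_perm _ _ _
  have hnd : ks.Nodup := (hperm_ks.nodup_iff).mpr (PySem.Set.nodup_ofList xs)
  have hge : ks.Pairwise (fun a b => b ≤ a) := PySem.List.sorted_pairwise_rev _ _
  have hgt : ks.Pairwise (fun a b => b < a) := by
    have := hge.and hnd
    exact this.imp (fun h => lt_of_le_of_ne h.1 (Ne.symm h.2))
  have hmem : ∀ a, a ∈ ks ↔ a ∈ xs := by
    intro a
    rw [List.Perm.mem_iff hperm_ks, PySem.Set.mem_ofList]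
  have hcnt : ∀ a, ys.count a = xs.count a := by
    intro a
    rw [hys, pv_count_flatMap_replicate xs ks hnd a]
    by_cases hax : a ∈ ks
    · simp [hax]
    · have : a ∉ xs := fun h => hax ((hmem a).mpr h)
      simp [hax, List.count_eq_zero_of_not_mem this]
  have hperm : (PySem.List.sorted xs (fun x => x) true).Perm ys :=
    (PySem.List.sorted_perm _ _ _).trans
      ((List.perm_iff_count.mpr (fun a => (hcnt a).symm)))
  exact List.Perm.eq_of_pairwise
    (fun a b _ _ h1 h2 => le_antisymm h2 h1)
    (PySem.List.sorted_pairwise_rev _ _)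
    (pv_pairwise_ge_flatMap ks (fun k => xs.count k) hgt)
    hperm

-- ===== VERDICT (by name: the statement is the Claim_ definition above) =====
theorem compute_string_properties_spec : Claim_equal_compute_string_properties := by
  intro s _
  unfold Spec_compute_string_properties compute_string_properties compute_string_properties_alt
  simp only [PySem.Dict.foldl_insert_getD_add_one_eq_counter,
    PySem.List.foldl_append_singleton_eq_map, PySem.List.foldl_append_eq_flatMap,
    List.nil_append, PySem.Dict.keys_counter, PySem.Dict.getD_counter,
    PySem.List.pyRepeat_singleton, Int.toNat_natCast]
  refine Prod.ext rfl (Prod.ext ?_ ?_)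
  · exact pv_sorted_rev_eq_grouped (s.toList.map (fun c => String.ofList [c]))
  · show ((PySem.Set.ofList _).length : Int) = ((PySem.Dict.counter _).size : Int)
    have h : (PySem.Dict.counter (s.toList.map (fun c => String.ofList [c]))).size
        = (PySem.Dict.counter (s.toList.map (fun c => String.ofList [c]))).keys.length := by
      simp [PySem.Dict.size, PySem.Dict.keys]
    rw [h, PySem.Dict.keys_counter]
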